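-- pv_equiv track=rewrite | github.com/GitHubguy97/scrollsafe-backend | services/utils.py | _clean_video_id
-- ===== SOURCE A (Python) =====
-- from typing import Optional
--
-- def _clean_video_id(value: Optional[str]) -> Optional[str]:
--     if not value:
--         return None
--     candidate = value.strip()
--     if not candidate:
--         return None
--     for delimiter in ("?", "&", "#"):
--         candidate = candidate.split(delimiter, 1)[0]
--     return candidate.strip("/") or None
-- ===== SOURCE B (Python) =====
-- from typing import Optional
--
-- def _clean_video_id(value: Optional[str]) -> Optional[str]:
--     if value is None:
--         return None
--     chars = []
--     for ch in value.strip():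
--         if ch in "?&#":
--             break
--         chars.append(ch)
--     return "".join(chars).strip("/") or None
-- ===== Notes on version B (the rewrite author's own statement) =====
-- stated objective: simpler
-- what changed: B replaces the three successive split-and-reassign passes (and the two emptiness guards) with a single character-level scan that collects characters until the first delimiter, then strips slashes once; the empty/whitespace-only guards fall out of the final falsy check.
import Mathlib
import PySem

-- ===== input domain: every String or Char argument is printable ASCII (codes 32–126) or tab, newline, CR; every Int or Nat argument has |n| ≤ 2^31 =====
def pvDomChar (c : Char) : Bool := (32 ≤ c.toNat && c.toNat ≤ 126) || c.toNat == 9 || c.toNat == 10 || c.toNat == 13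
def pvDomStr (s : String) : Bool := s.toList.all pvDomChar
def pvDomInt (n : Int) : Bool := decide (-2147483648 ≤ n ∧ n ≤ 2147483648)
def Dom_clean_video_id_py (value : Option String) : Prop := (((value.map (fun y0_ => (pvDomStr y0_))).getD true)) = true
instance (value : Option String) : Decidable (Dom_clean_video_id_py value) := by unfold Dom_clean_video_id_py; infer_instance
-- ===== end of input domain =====

-- B replaces the three split-and-reassign passes and the two emptiness guards with one
-- character-level scan that stops at the first delimiter (simpler decomposition, same cost).

-- ===== PORT A =====
def clean_video_id_py (value : Option String) : Option String :=
  match value with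
  | none => none
  | some v =>
    if v = "" then none
    else
      let candidate := PySem.Str.strip v
      if candidate = "" then none
      else
        let candidate := ["?", "&", "#"].foldl
          (fun c d => ((PySem.Str.splitMax? c d 1).getD []).headD "") candidate
        let r := PySem.Str.stripChars candidate "/"
        if r = "" then none else some r

-- ===== PORT B =====
-- the for-loop with break: collect characters until the first one in "?&#"
def pvScanUntilDelim : List Char → List Char
  | [] => []
  | c :: rest => if c == '?' || c == '&' || c == '#' then [] else c :: pvScanUntilDelim rest

def clean_video_id_py_alt (value : Option String) : Option String :=
  match value with
  | none => none
  | some v =>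
    let chars := pvScanUntilDelim (PySem.Str.strip v).toList
    let r := PySem.Str.stripChars (String.ofList chars) "/"
    if r = "" then none else some r

-- ===== PRECONDITION & SPEC =====
def Spec_clean_video_id_py (value : Option String) (out : Option String) : Prop := out = clean_video_id_py_alt value
instance (value : Option String) (out : Option String) : Decidable (Spec_clean_video_id_py value out) := by unfold Spec_clean_video_id_py; infer_instance

-- ===== CLAIM (what is proved, stated in full; the proofs are below) =====
def Claim_equal_clean_video_id_py : Prop := ∀ (value : Option String), Dom_clean_video_id_py value → Spec_clean_video_id_py value (clean_video_id_py value)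

-- ===== LEMMAS AND PROOFS =====

-- splitOnMax.go with maxsplit budget 0 returns immediately
lemma go_msplit_zero (d : Char) (fuel : ℕ) (l cur : List Char) (acc : List (List Char)) :
    PySem.Chars.splitOnMax.go [d] fuel 0 l cur acc = ((cur.reverse ++ l) :: acc).reverse := by
  cases fuel <;> cases l <;> simp [PySem.Chars.splitOnMax.go]

-- splitOnMax.go for a single-char separator and maxsplit 1: first piece is the takeWhile prefix
lemma go_msplit_one (d : Char) : ∀ (fuel : ℕ) (s cur : List Char) (acc : List (List Char)), s.length ≤ fuel →
    PySem.Chars.splitOnMax.go [d] fuel 1 s cur acc =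
      acc.reverse ++ ((cur.reverse ++ s.takeWhile (fun c => c != d)) ::
        (if d ∈ s then [(s.dropWhile (fun c => c != d)).tail] else [])) := by
  intro fuel
  induction fuel with
  | zero =>
    intro s cur acc h
    have : s = [] := List.eq_nil_of_length_eq_zero (Nat.le_zero.mp h)
    subst this; simp [PySem.Chars.splitOnMax.go]
  | succ n ih =>
    intro s cur acc h
    cases s with
    | nil => simp [PySem.Chars.splitOnMax.go]
    | cons c rest =>
      by_cases hc : c = d
      · subst hc
        simp [PySem.Chars.splitOnMax.go, List.isPrefixOf, go_msplit_zero]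
      · have hpre : [d].isPrefixOf (c :: rest) = false := by
          simp [List.isPrefixOf]; exact fun hdc => absurd hdc.symm hc
        simp only [PySem.Chars.splitOnMax.go, hpre]
        rw [ih rest (c :: cur) acc (by simpa using Nat.le_of_succ_le_succ (by simpa using h))]
        simp [hc, Ne.symm hc]

-- the head of a single-char split with maxsplit 1 is the takeWhile prefix
lemma split_head (c : String) (d : Char) (ds : String) (hds : ds.toList = [d]) :
    ((PySem.Str.splitMax? c ds 1).getD []).headD "" =
      String.ofList (c.toList.takeWhile (fun x => x != d)) := by
  simp only [PySem.Str.splitMax?, hds, PySem.Chars.splitMax?, PySem.Chars.splitOnMax]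
  norm_num
  rw [go_msplit_one d (c.length + 1) c.toList [] [] (by simp)]
  by_cases hm : d ∈ c.toList <;> simp [hm]

-- the three nested takeWhiles of A's successive splits are B's single scan
lemma scan_eq_takeWhile (l : List Char) :
    ((l.takeWhile (fun x => x != '?')).takeWhile (fun x => x != '&')).takeWhile
        (fun x => x != '#') = pvScanUntilDelim l := by
  induction l with
  | nil => rfl
  | cons c rest ih =>
    by_cases h1 : c = '?'
    · subst h1; simp [pvScanUntilDelim]
    · by_cases h2 : c = '&'
      · subst h2; simp [pvScanUntilDelim]
      · by_cases h3 : c = '#'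
        · subst h3; simp [pvScanUntilDelim]
        · simp [pvScanUntilDelim, h1, h2, h3, ih]

-- core equality: the folded splits equal the single scan, as strings
lemma core_eq (s : String) :
    (["?", "&", "#"].foldl (fun c d => ((PySem.Str.splitMax? c d 1).getD []).headD "") s) =
      String.ofList (pvScanUntilDelim s.toList) := by
  have h1 : ("?" : String).toList = ['?'] := by decide
  have h2 : ("&" : String).toList = ['&'] := by decide
  have h3 : ("#" : String).toList = ['#'] := by decide
  simp only [List.foldl_cons, List.foldl_nil]
  rw [split_head s '?' "?" h1, split_head _ '&' "&" h2, split_head _ '#' "#" h3]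
  simp only [String.toList_ofList]
  rw [scan_eq_takeWhile]

-- ===== VERDICT (by name: the statement is the Claim_ definition above) =====
theorem clean_video_id_py_spec : Claim_equal_clean_video_id_py := by
  intro value _
  unfold Spec_clean_video_id_py clean_video_id_py clean_video_id_py_alt
  cases value with
  | none => rfl
  | some v =>
    simp only []
    by_cases hv : v = ""
    · subst hv; decide
    · simp only [hv, if_false]
      by_cases hc : PySem.Str.strip v = ""
      · rw [hc]; simp; decide
      · simp only [hc, if_false]
        rw [core_eq]
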